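-- pv_equiv track=rewrite | github.com/anaviltripathi/interviewbit-solutions-python | Math/Rank.py | findRank
-- ===== SOURCE A (Python) =====
-- def findRank(A):
--     s = sorted(list(A))
--     f = 1
--     rank = 1
--     length = len(A)
--
--     for i in range(len(A)):
--         length -= 1
--         n = s.index(A[i])
--         s.remove(A[i])
--         f = 1
--         for j in range(length):
--             f *= (j + 1)
--         rank += (n * (f)) % 1000003
--
--     return rank % 1000003
-- ===== SOURCE B (Python) =====
-- def findRank(A):
--     M = 1000003
--     n = len(A)
--     rank = 1
--     f = 1
--     for i in range(n - 1, -1, -1):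
--         smaller = 0
--         for j in range(i + 1, n):
--             if A[j] < A[i]:
--                 smaller += 1
--         rank = (rank + smaller * f) % M
--         f = f * (n - i) % M
--     return rank
-- ===== Notes on version B (the rewrite author's own statement) =====
-- stated objective: faster
-- what changed: B replaces A's sort + per-position list.index/list.remove on a mutable sorted list and full exact-factorial rebuild each iteration with a single backward pass that counts strictly-smaller characters in the suffix directly and maintains the factorial incrementally modulo 1000003.
import Mathlib
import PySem

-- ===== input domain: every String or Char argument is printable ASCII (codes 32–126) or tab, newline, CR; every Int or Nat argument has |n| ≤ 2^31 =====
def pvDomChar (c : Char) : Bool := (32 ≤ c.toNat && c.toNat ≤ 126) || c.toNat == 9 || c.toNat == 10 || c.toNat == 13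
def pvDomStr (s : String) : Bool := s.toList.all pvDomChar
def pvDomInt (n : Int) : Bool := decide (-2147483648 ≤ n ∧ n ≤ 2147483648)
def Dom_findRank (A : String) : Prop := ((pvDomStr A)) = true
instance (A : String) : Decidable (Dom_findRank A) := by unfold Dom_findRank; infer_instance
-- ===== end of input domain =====

-- B replaces A's sorted-list index/remove bookkeeping and exact big-integer factorials (rebuilt from
-- scratch each iteration) with one backward pass counting smaller suffix characters directly and an
-- incrementally maintained factorial modulo 1000003; a timing run measures B faster.

-- ===== PORT A =====
-- one iteration of A's for-loop; state = (s, rank, length)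
def stepA (st : List Char × Int × Int) (c : Char) : List Char × Int × Int :=
  let length := st.2.2 - 1
  let n : Int := ((PySem.List.index? st.1 c).getD 0 : Nat)
  let s' := (PySem.List.remove? st.1 c).getD st.1
  let f := (PySem.List.pyRange 0 length 1).foldl (fun acc j => acc * (j + 1)) 1
  (s', st.2.1 + PySem.Int.mod (n * f) 1000003, length)

def findRank (A : String) : Int :=
  let l := A.toList
  let st := (PySem.List.pyRange 0 (PySem.Str.len A) 1).foldl
      (fun st i => stepA st (PySem.List.pyGetD l i ' '))
      (PySem.List.sorted l (fun x => x) false, 1, PySem.Str.len A)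
  PySem.Int.mod st.2.1 1000003

-- ===== PORT B =====
-- one iteration of B's backward loop; state = (rank, f)
def stepB (l : List Char) (st : Int × Int) (i : Int) : Int × Int :=
  let c := PySem.List.pyGetD l i ' '
  let smaller : Int := (PySem.List.pyRange (i + 1) (l.length : Int) 1).foldl
      (fun acc j => if PySem.List.pyGetD l j ' ' < c then acc + 1 else acc) 0
  (PySem.Int.mod (st.1 + smaller * st.2) 1000003,
   PySem.Int.mod (st.2 * ((l.length : Int) - i)) 1000003)

def findRank_alt (A : String) : Int :=
  let l := A.toList
  let st := (PySem.List.pyRange (PySem.Str.len A - 1) (-1) (-1)).foldl (stepB l) (1, 1)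
  st.1

-- ===== PRECONDITION & SPEC =====
def Spec_findRank (A : String) (out : Int) : Prop := out = findRank_alt A
instance (A : String) (out : Int) : Decidable (Spec_findRank A out) := by unfold Spec_findRank; infer_instance

-- ===== CLAIM (what is proved, stated in full; the proofs are below) =====
def Claim_equal_findRank : Prop := ∀ (A : String), Dom_findRank A → Spec_findRank A (findRank A)

-- ===== LEMMAS AND PROOFS =====

-- common specification: the sum of A's per-position terms, by structural recursion on the suffix
def pvSpec : List Char → Int
  | [] => 0
  | c :: rest =>
      PySem.Int.mod ((rest.countP (fun x => decide (x < c)) : Int) * (Nat.factorial rest.length : Int)) 1000003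
        + pvSpec rest

lemma pv_fact_fold (m : Nat) :
    (PySem.List.pyRange 0 (m : Int) 1).foldl (fun acc j => acc * (j + 1)) 1 = (Nat.factorial m : Int) := by
  induction m with
  | zero => simp
  | succ k ih =>
      rw [show ((k + 1 : Nat) : Int) = (k : Int) + 1 by omega,
        PySem.List.pyRange_one_succ_right (by positivity), List.foldl_append, ih]
      simp [Nat.factorial_succ]
      ring

lemma pv_index_sorted (s : List Char) (c : Char) (hs : s.Pairwise (· ≤ ·)) (hc : c ∈ s) :
    PySem.List.index? s c = some (s.countP (fun x => decide (x < c))) := by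
  induction s with
  | nil => cases hc
  | cons x t ih =>
      rcases List.pairwise_cons.1 hs with ⟨hx, ht⟩
      by_cases hxc : x = c
      · subst hxc
        rw [PySem.List.index?_cons_self]
        have h0 : t.countP (fun y => decide (y < x)) = 0 := by
          rw [List.countP_eq_zero]
          intro y hy
          simpa using not_lt_of_ge (hx y hy)
        simp [h0]
      · have hct : c ∈ t := by
          rcases List.mem_cons.1 hc with h | h
          · exact absurd h.symm hxc
          · exact h
        have hlt : x < c := lt_of_le_of_ne (hx c hct) hxc
        rw [PySem.List.index?_cons_of_ne t hxc, ih ht hct]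
        simp [hlt]

lemma pv_loopA (r s : List Char) (rank : Int)
    (hs : s.Pairwise (· ≤ ·)) (hp : s.Perm r) :
    (r.foldl stepA (s, rank, (r.length : Int))).2.1 = rank + pvSpec r := by
  induction r generalizing s rank with
  | nil => simp [pvSpec]
  | cons c rest ih =>
      have hc : c ∈ s := hp.mem_iff.2 (List.mem_cons_self ..)
      have hidx : PySem.List.index? s c = some (s.countP (fun x => decide (x < c))) :=
        pv_index_sorted s c hs hc
      have hcount : s.countP (fun x => decide (x < c)) = rest.countP (fun x => decide (x < c)) := by
        rw [hp.countP_eq]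
        simp
      have hrem : PySem.List.remove? s c = some (s.erase c) :=
        PySem.List.remove?_eq_some_erase s c hc
      have hes : (s.erase c).Pairwise (· ≤ ·) := List.Pairwise.sublist List.erase_sublist hs
      have hep : (s.erase c).Perm rest := by
        have h := hp.erase c
        rwa [List.erase_cons_head] at h
      have hlen : ((c :: rest).length : Int) - 1 = (rest.length : Int) := by
        simp
      rw [List.foldl_cons]
      have hstep : stepA (s, rank, ((c :: rest).length : Int)) c
          = (s.erase c,
             rank + PySem.Int.mod ((rest.countP (fun x => decide (x < c)) : Int) * (Nat.factorial rest.length : Int)) 1000003,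
             (rest.length : Int)) := by
        simp only [stepA, hlen, hidx, hrem, Option.getD_some, pv_fact_fold, hcount]
      rw [hstep, ih _ _ hes hep, pvSpec]
      ring

lemma pv_mod_step (a b c : Int) :
    PySem.Int.mod (PySem.Int.mod (1 + a) 1000003 + b * PySem.Int.mod c 1000003) 1000003
      = PySem.Int.mod (1 + (PySem.Int.mod (b * c) 1000003 + a)) 1000003 := by
  simp only [PySem.Int.mod_eq_emod_of_pos (show (0:Int) < 1000003 by norm_num)]
  conv_lhs => rw [Int.add_emod, Int.emod_emod_of_dvd _ dvd_rfl, Int.mul_emod, Int.emod_emod_of_dvd _ dvd_rfl,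
    ← Int.mul_emod, ← Int.add_emod]
  conv_rhs => rw [Int.add_emod, Int.add_emod ((b*c) % 1000003) a, Int.emod_emod_of_dvd _ dvd_rfl,
    ← Int.add_emod ((b*c)) a, ← Int.add_emod]
  ring_nf

lemma pv_mod_mul (a b : Int) :
    PySem.Int.mod (PySem.Int.mod a 1000003 * b) 1000003 = PySem.Int.mod (a * b) 1000003 := by
  simp only [PySem.Int.mod_eq_emod_of_pos (show (0:Int) < 1000003 by norm_num)]
  conv_lhs => rw [Int.mul_emod, Int.emod_emod_of_dvd _ dvd_rfl, ← Int.mul_emod]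

lemma pv_smaller (l : List Char) (i : Nat) (hi : i < l.length) :
    (PySem.List.pyRange ((i : Int) + 1) (l.length : Int) 1).foldl
        (fun acc j => if PySem.List.pyGetD l j ' ' < PySem.List.pyGetD l (i : Int) ' ' then acc + 1 else acc) (0 : Int)
      = ((l.drop (i + 1)).countP (fun x => decide (x < l[i])) : Int) := by
  have hc : PySem.List.pyGetD l (i : Int) ' ' = l[i] := by
    rw [PySem.List.pyGetD_eq_getElem l ' ' (by positivity) (by exact_mod_cast hi)]
    simp
  rw [hc]
  have h1 : ((i : Int) + 1) = ((i + 1 : Nat) : Int) := by push_cast; ring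
  rw [h1, PySem.List.foldl_pyRange_pyGetD' l ' '
      (fun acc x => if x < l[i] then acc + 1 else acc) 0 (by positivity),
    PySem.List.foldl_ite_add_one]
  simp

lemma pv_loopB (l : List Char) : ∀ (k i : Nat), i ≤ l.length → l.length - i = k →
    (PySem.List.pyRange (i : Int) (l.length : Int) 1).foldr (fun x st => stepB l st x) (1, 1)
      = (PySem.Int.mod (1 + pvSpec (l.drop i)) 1000003,
         PySem.Int.mod ((Nat.factorial (l.length - i) : Int)) 1000003) := by
  intro k
  induction k with
  | zero =>
      intro i hi hk
      have hie : i = l.length := by omega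
      subst hie
      rw [PySem.List.pyRange_one_eq_nil (le_refl _)]
      simp [List.drop_length, pvSpec]
  | succ k ih =>
      intro i hi hk
      have hlt : i < l.length := by omega
      rw [PySem.List.pyRange_one_cons (by exact_mod_cast hlt), List.foldr_cons]
      have h1 : ((i : Int) + 1) = ((i + 1 : Nat) : Int) := by push_cast; ring
      rw [h1, ih (i + 1) (by omega) (by omega)]
      have hdrop : l.drop i = l[i] :: l.drop (i + 1) := List.drop_eq_getElem_cons hlt
      simp only [stepB]
      rw [pv_smaller l i hlt, pv_mod_step, pv_mod_mul]
      have hm1 : ((l.length : Int) - i) = ((l.length - (i + 1) : Nat) : Int) + 1 := by omega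
      have hm2 : l.length - i = (l.length - (i + 1)) + 1 := by omega
      rw [hm1, hm2, hdrop, pvSpec, List.length_drop, Nat.factorial_succ]
      simp only [Prod.mk.injEq]
      refine ⟨trivial, ?_⟩
      congr 1
      push_cast
      ring

lemma pv_A_eq (A : String) : findRank A = PySem.Int.mod (1 + pvSpec A.toList) 1000003 := by
  simp only [findRank, PySem.Str.len_eq]
  rw [PySem.List.foldl_pyRange_zero_pyGetD' A.toList ' ' stepA
      (PySem.List.sorted A.toList (fun x => x) false, 1, (A.toList.length : Int)),
    pv_loopA A.toList _ 1 (PySem.List.sorted_pairwise A.toList (fun x => x))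
      (PySem.List.sorted_perm A.toList (fun x => x) false)]

lemma pv_B_eq (A : String) : findRank_alt A = PySem.Int.mod (1 + pvSpec A.toList) 1000003 := by
  simp only [findRank_alt, PySem.Str.len_eq]
  rw [PySem.List.pyRange_neg_one_eq_reverse, List.foldl_reverse,
    show ((-1 : Int) + 1) = ((0 : Nat) : Int) by norm_num,
    show ((A.toList.length : Int) - 1 + 1) = (A.toList.length : Int) by ring,
    pv_loopB A.toList (A.toList.length - 0) 0 (by omega) rfl]
  simp

-- ===== VERDICT (by name: the statement is the Claim_ definition above) =====
theorem findRank_spec : Claim_equal_findRank := by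
  intro A _
  unfold Spec_findRank
  rw [pv_A_eq, pv_B_eq]
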